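-- pv_equiv track=rewrite | github.com/orionewton/CodinGame | Medium/maya.py | convert
-- ===== SOURCE A (Python) =====
-- def convert(n, maya, ln, h):
--     if len(n) == ln * h:
--         return maya.get(n)
--     digit = len(n) // (ln * h)
--     res = ''
--     for i in range(digit):
--         a = i*ln*h
--         b = i*ln*h + ln*h
--         num = n[a:b]
--         tmp = maya.get(num)
--         res += base(tmp)
--     ans = 0
--     n = len(res)-1
--     for i in range(len(res)):
--         ans = ans + int(rebase(res[i])) * 20**n
--         n -= 1
--     return ans
--
-- def base(num):
--     if num == 10:
--         return 'A'
--     if num == 11: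
--         return 'B'
--     if num == 12:
--         return 'C'
--     if num == 13:
--         return 'D'
--     if num == 14:
--         return 'E'
--     if num == 15:
--         return 'F'
--     if num == 16:
--         return 'G'
--     if num == 17:
--         return 'H'
--     if num == 18:
--         return 'I'
--     if num == 19:
--         return 'J'
--     if num == 20:
--         return 'K'
--     return str(num)
--
-- def rebase(num):
--     if num == 'A':
--         return 10
--     if num == 'B':
--         return 11
--     if num == 'C':
--         return 12
--     if num == 'D':
--         return 13
--     if num == 'E':
--         return 14
--     if num == 'F':
--         return 15
--     if num == 'G':
--         return 16
--     if num == 'H':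
--         return 17
--     if num == 'I':
--         return 18
--     if num == 'J':
--         return 19
--     if num == 'K':
--         return 20
--     return int(num)
-- ===== SOURCE B (Python) =====
-- def convert(n, maya, ln, h):
--     if len(n) == ln * h:
--         return maya.get(n)
--     w = ln * h
--     ans = 0
--     for i in range(len(n) // w):
--         ans = ans * 20 + maya.get(n[i*w:(i+1)*w])
--     return ans
-- ===== Notes on version B (the rewrite author's own statement) =====
-- stated objective: simpler
-- what changed: Replaced A's two-phase pipeline (encode each block's value into a base-20 character string via base(), then decode char by char with rebase() and explicit 20**k weights) by a single Horner pass that multiplies the accumulator by 20 and adds each block's dictionary value directly, dropping base/rebase and the intermediate string entirely.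
-- outside the precondition, e.g. on convert('xw', {'x': 5, 'w': 21}, 1, 1): A returns 2041, B returns 121
import Mathlib
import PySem

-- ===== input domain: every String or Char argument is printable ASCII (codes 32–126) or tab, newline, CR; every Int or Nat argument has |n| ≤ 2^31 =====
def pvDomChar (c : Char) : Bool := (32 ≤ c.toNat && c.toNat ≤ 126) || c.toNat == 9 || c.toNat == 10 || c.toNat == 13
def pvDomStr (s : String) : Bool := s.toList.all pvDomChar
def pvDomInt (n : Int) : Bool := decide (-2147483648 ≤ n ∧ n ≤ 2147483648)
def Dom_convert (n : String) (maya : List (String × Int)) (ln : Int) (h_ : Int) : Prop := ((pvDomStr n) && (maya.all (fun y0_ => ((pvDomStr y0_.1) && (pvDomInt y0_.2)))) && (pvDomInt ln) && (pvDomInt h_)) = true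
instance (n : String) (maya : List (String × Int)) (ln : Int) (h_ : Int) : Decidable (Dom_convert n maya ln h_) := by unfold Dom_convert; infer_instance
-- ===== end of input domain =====

-- B replaces A's encode-to-base-20-string / decode-with-20**k pipeline by one direct Horner pass over the blocks (objective: simpler).


-- ===== PORT A =====
-- helper 'base' of A: called on maya.get(num), so its argument is an Option; str(None) = "None"
def pvBaseA (num : Option Int) : List Char :=
  if num = some 10 then ['A']
  else if num = some 11 then ['B']
  else if num = some 12 then ['C']
  else if num = some 13 then ['D']
  else if num = some 14 then ['E']
  else if num = some 15 then ['F']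
  else if num = some 16 then ['G']
  else if num = some 17 then ['H']
  else if num = some 18 then ['I']
  else if num = some 19 then ['J']
  else if num = some 20 then ['K']
  else match num with
       | some k => PySem.Int.toChars k
       | none => ['N', 'o', 'n', 'e']   -- str(None)

-- helper 'rebase' of A, applied to one character of res; int(c) raising = none
def pvRebaseA (c : Char) : Option Int :=
  if c = 'A' then some 10
  else if c = 'B' then some 11
  else if c = 'C' then some 12
  else if c = 'D' then some 13
  else if c = 'E' then some 14
  else if c = 'F' then some 15
  else if c = 'G' then some 16
  else if c = 'H' then some 17
  else if c = 'I' then some 18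
  else if c = 'J' then some 19
  else if c = 'K' then some 20
  else PySem.Int.ofChars? [c]

def convert (n : String) (maya : List (String × Int)) (ln : Int) (h_ : Int) : Option Int :=
  let cs := n.toList
  if (cs.length : Int) = ln * h_ then (PySem.Dict.ofList maya).get? n
  else
    match PySem.Int.floordiv? (cs.length : Int) (ln * h_) with
    | none => none             -- ZeroDivisionError
    | some digit =>
      let res : List Char := (PySem.List.pyRange 0 digit 1).foldl
        (fun acc i => acc ++ pvBaseA ((PySem.Dict.ofList maya).get?
          (String.ofList (PySem.List.slice cs (some (i * (ln * h_))) (some (i * (ln * h_) + ln * h_)))))) []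
      ((res.foldl
        (fun (st : Option Int × Int) c =>
          match st.1, pvRebaseA c with
          | some a, some v => (some (a + v * 20 ^ st.2.toNat), st.2 - 1)
          | _, _ => (none, st.2 - 1))      -- a raise in rebase/int propagates as none
        ((some 0 : Option Int), (res.length : Int) - 1))).1

-- ===== PORT B =====
def convert_alt (n : String) (maya : List (String × Int)) (ln : Int) (h_ : Int) : Option Int :=
  let cs := n.toList
  if (cs.length : Int) = ln * h_ then (PySem.Dict.ofList maya).get? n
  else
    (PySem.Int.floordiv? (cs.length : Int) (ln * h_)).elim
      none                     -- ZeroDivisionError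
      (fun k =>
        (PySem.List.pyRange 0 k 1).foldl
          (fun acc i =>
            acc.bind fun a =>
              ((PySem.Dict.ofList maya).get?
                  (String.ofList (PySem.List.slice cs (some (i * (ln * h_))) (some ((i + 1) * (ln * h_)))))).map
                fun v => a * 20 + v)   -- TypeError on a missing block: none
          (some 0))

-- ===== PRECONDITION & SPEC =====
-- Pre_ excludes inputs where A raises (ln*h = 0 with nonempty n: ZeroDivisionError; a missing or negative
-- block value: ValueError in rebase/int) and the malformed dictionaries mapping a needed block to a value
-- above 20, where no base-20 digit exists and A's decimal-string round-trip and B's arithmetic carry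
-- produce different accidental values.
def Pre_convert (n : String) (maya : List (String × Int)) (ln : Int) (h_ : Int) : Prop :=
  ((n.toList.length : Int) = ln * h_) ∨ (ln * h_ < 0) ∨
  (0 < ln * h_ ∧
    ∀ i ∈ PySem.List.pyRange 0 (PySem.Int.floordiv (n.toList.length : Int) (ln * h_)) 1,
      (match (PySem.Dict.ofList maya).get?
          (String.ofList (PySem.List.slice n.toList (some (i * (ln * h_))) (some (i * (ln * h_) + ln * h_)))) with
        | some v => decide (0 ≤ v ∧ v ≤ 20)
        | none => false) = true)
instance (n : String) (maya : List (String × Int)) (ln : Int) (h_ : Int) : Decidable (Pre_convert n maya ln h_) := by unfold Pre_convert; infer_instance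

def pvWitness_convert : String × (List (String × Int)) × Int × Int := ("ba", [("b", 2), ("a", 1)], 1, 1)

def Spec_convert (n : String) (maya : List (String × Int)) (ln : Int) (h_ : Int) (out : Option Int) : Prop := out = convert_alt n maya ln h_
instance (n : String) (maya : List (String × Int)) (ln : Int) (h_ : Int) (out : Option Int) : Decidable (Spec_convert n maya ln h_ out) := by unfold Spec_convert; infer_instance

-- ===== CLAIM (what is proved, stated in full; the proofs are below) =====
def Claim_equal_convert : Prop := ∀ (n : String) (maya : List (String × Int)) (ln : Int) (h_ : Int), Dom_convert n maya ln h_ → Pre_convert n maya ln h_ → Spec_convert n maya ln h_ (convert n maya ln h_)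

-- ===== LEMMAS AND PROOFS =====

-- the single character A's base() emits for a legal digit value 0..20
def pvDigitChar (v : Int) : Char :=
  if v = 10 then 'A' else if v = 11 then 'B' else if v = 12 then 'C' else if v = 13 then 'D'
  else if v = 14 then 'E' else if v = 15 then 'F' else if v = 16 then 'G' else if v = 17 then 'H'
  else if v = 18 then 'I' else if v = 19 then 'J' else if v = 20 then 'K'
  else if v = 0 then '0' else if v = 1 then '1' else if v = 2 then '2' else if v = 3 then '3'
  else if v = 4 then '4' else if v = 5 then '5' else if v = 6 then '6' else if v = 7 then '7'
  else if v = 8 then '8' else '9'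

theorem pvBaseA_digit (v : Int) (h0 : 0 ≤ v) (h1 : v ≤ 20) :
    pvBaseA (some v) = [pvDigitChar v] := by
  interval_cases v <;> decide

theorem pvRebaseA_digit (v : Int) (h0 : 0 ≤ v) (h1 : v ≤ 20) :
    pvRebaseA (pvDigitChar v) = some v := by
  interval_cases v <;> decide

-- Horner evaluation of a digit list
def pvHorner (vs : List Int) : Int := vs.foldl (fun a v => a * 20 + v) 0

theorem pvHorner_shift (vs : List Int) (x : Int) :
    vs.foldl (fun a v => a * 20 + v) x = x * 20 ^ vs.length + pvHorner vs := by
  induction vs generalizing x with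
  | nil => simp [pvHorner]
  | cons v t ih =>
    simp only [List.foldl_cons, List.length_cons]
    rw [ih (x * 20 + v), show pvHorner (v :: t) = t.foldl (fun a v => a * 20 + v) v from by
          simp [pvHorner],
        ih v]
    ring

-- A's first loop: with all block values legal digits, res is the list of their digit characters
theorem pvResLoop (d : PySem.Dict String Int) (m : Int) (cs : List Char) (g : Int → Int)
    (idxs : List Int) (acc : List Char)
    (h : ∀ i ∈ idxs,
      d.get? (String.ofList (PySem.List.slice cs (some (i * m)) (some (i * m + m)))) = some (g i)
        ∧ 0 ≤ g i ∧ g i ≤ 20) :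
    idxs.foldl
      (fun acc i =>
        acc ++ pvBaseA (d.get? (String.ofList (PySem.List.slice cs (some (i * m)) (some (i * m + m))))))
      acc
      = acc ++ (idxs.map g).map pvDigitChar := by
  induction idxs generalizing acc with
  | nil => simp
  | cons i t ih =>
    obtain ⟨hf, h0, h1⟩ := h i (by simp)
    simp only [List.foldl_cons, List.map_cons]
    rw [hf, pvBaseA_digit _ h0 h1, ih _ (fun j hj => h j (by simp [hj]))]
    simp

-- A's second loop on a list of legal digit characters computes the positional sum = Horner value
theorem pvHorner_cons (v : Int) (t : List Int) :
    pvHorner (v :: t) = v * 20 ^ t.length + pvHorner t := by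
  rw [show pvHorner (v :: t) = t.foldl (fun a v => a * 20 + v) v from by simp [pvHorner],
      pvHorner_shift]

theorem pvAnsLoop (vs : List Int) (a : Int)
    (h : ∀ v ∈ vs, 0 ≤ v ∧ v ≤ 20) :
    (vs.map pvDigitChar).foldl
      (fun (st : Option Int × Int) c =>
        match st.1, pvRebaseA c with
        | some a, some v => (some (a + v * 20 ^ st.2.toNat), st.2 - 1)
        | _, _ => (none, st.2 - 1))
      ((some a : Option Int), (vs.length : Int) - 1)
      = (some (a + pvHorner vs), -1) := by
  induction vs generalizing a with
  | nil => simp [pvHorner]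
  | cons v t ih =>
    obtain ⟨h0, h1⟩ := h v (by simp)
    simp only [List.map_cons, List.foldl_cons, List.length_cons]
    rw [pvRebaseA_digit v h0 h1]
    have e1 : ((t.length + 1 : Nat) : Int) - 1 = (t.length : Int) := by push_cast; ring
    simp only [e1, Int.toNat_natCast]
    rw [ih (a + v * 20 ^ t.length) (fun w hw => h w (by simp [hw])), pvHorner_cons]
    congr 2
    ring

-- B's loop: with all blocks present, it is Horner evaluation of the block values
theorem pvBLoop (d : PySem.Dict String Int) (m : Int) (cs : List Char) (g : Int → Int)
    (idxs : List Int) (a : Int)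
    (h : ∀ i ∈ idxs,
      d.get? (String.ofList (PySem.List.slice cs (some (i * m)) (some (i * m + m)))) = some (g i)) :
    idxs.foldl
      (fun acc i =>
        acc.bind fun a =>
          (d.get? (String.ofList (PySem.List.slice cs (some (i * m)) (some (i * m + m))))).map
            fun v => a * 20 + v)
      (some a)
      = some ((idxs.map g).foldl (fun a v => a * 20 + v) a) := by
  induction idxs generalizing a with
  | nil => simp
  | cons i t ih =>
    simp only [List.foldl_cons, List.map_cons]
    rw [h i (by simp)]
    exact ih _ (fun j hj => h j (by simp [hj]))

-- ===== VERDICT (by name: the statement is the Claim_ definition above) =====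
theorem convert_spec : Claim_equal_convert := by
  intro n maya ln h_ _hdom hpre
  unfold Spec_convert convert convert_alt
  rcases hpre with heq | hneg | ⟨hpos, hblocks⟩
  · -- single block: both return the same lookup
    simp only [if_pos heq]
  · -- ln*h < 0: the string length (≥ 0) never equals it; digit ≤ 0, both loops are empty
    have hne : ((n.toList.length : Int)) ≠ ln * h_ := by
      have : (0 : Int) ≤ (n.toList.length : Int) := by positivity
      omega
    have hm0 : ln * h_ ≠ 0 := by omega
    have hdig : PySem.Int.floordiv (n.toList.length : Int) (ln * h_) ≤ 0 := by
      have h1 := PySem.Int.floordiv_mul_add_mod (n.toList.length : Int) (ln * h_)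
      have h2 := PySem.Int.mod_neg_bounds (a := (n.toList.length : Int)) (b := ln * h_) hneg
      by_contra hc
      push Not at hc
      nlinarith [Int.natCast_nonneg n.toList.length]
    have hsome : PySem.Int.floordiv? ((n.toList.length : Int)) (ln * h_)
        = some (PySem.Int.floordiv ((n.toList.length : Int)) (ln * h_)) := by
      simp [PySem.Int.floordiv?, PySem.Int.floordiv, hm0]
    simp only [if_neg hne, hsome, Option.elim, PySem.List.pyRange_one_eq_nil hdig, List.foldl_nil]
  · -- ln*h > 0: A's round-trip and B's Horner pass agree
    by_cases heq : ((n.toList.length : Int)) = ln * h_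
    · simp only [if_pos heq]
    · set m := ln * h_ with hm
      set cs := n.toList with hcs
      set d := PySem.Dict.ofList maya with hd
      have hm0 : m ≠ 0 := by omega
      set digit := PySem.Int.floordiv (cs.length : Int) m with hdig
      set idxs := PySem.List.pyRange 0 digit 1 with hidxs
      set g : Int → Int := fun i =>
        (d.get? (String.ofList (PySem.List.slice cs (some (i * m)) (some (i * m + m))))).getD 0 with hg
      have hfg : ∀ i ∈ idxs,
          d.get? (String.ofList (PySem.List.slice cs (some (i * m)) (some (i * m + m)))) = some (g i)
            ∧ 0 ≤ g i ∧ g i ≤ 20 := by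
        intro i hi
        have hb := hblocks i hi
        cases hv : d.get? (String.ofList (PySem.List.slice cs (some (i * m)) (some (i * m + m)))) with
        | none => rw [hv] at hb; simp at hb
        | some v =>
          rw [hv] at hb
          simp only [decide_eq_true_eq] at hb
          have hgv : g i = v := by simp [hg, hv]
          exact ⟨by rw [hgv], by rw [hgv]; exact hb.1, by rw [hgv]; exact hb.2⟩
      have hsome : PySem.Int.floordiv? ((cs.length : Int)) m = some digit := by
        simp [PySem.Int.floordiv?, PySem.Int.floordiv, hm0, hdig]
      simp only [if_neg heq, hsome, Option.elim]
      -- rewrite B's slice bound (i+1)*m into A's i*m + m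
      have hsl : ∀ i : Int, (i + 1) * m = i * m + m := fun i => by ring
      simp only [hsl]
      rw [pvResLoop d m cs g idxs [] hfg, List.nil_append]
      have hans := pvAnsLoop (idxs.map g) 0 (by
        intro v hv
        obtain ⟨i, hi, rfl⟩ := List.mem_map.mp hv
        exact (hfg i hi).2)
      have hb := pvBLoop d m cs g idxs 0 (fun i hi => (hfg i hi).1)
      simp only [List.length_map] at hans ⊢
      rw [hans, hb]
      simp [pvHorner]
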